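-- pv_equiv track=rewrite | github.com/zzzzz1797/LeetCode | leet_code_1165.py | answer_1
-- ===== SOURCE A (Python) =====
-- def answer_1(keyboard, word):
--     keyboard_mapper = {key: index for index, key in enumerate(keyboard)}
--
--     current_char = word[0]
--     result = keyboard_mapper[current_char]
--
--     for index in range(1, len(word)):
--         char = word[index]
--         result += abs(keyboard_mapper[current_char] - keyboard_mapper[char])
--         current_char = char
--     return result
-- ===== SOURCE B (Python) =====
-- def answer_1(keyboard, word):
--     # Gap-crossing algorithm: the finger starts at slot 0 and visits the slot of
--     # each letter; total travel = sum over the gaps between adjacent key slots of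
--     # the number of moves crossing that gap, computed with a difference array
--     # and one prefix-sum sweep over the keyboard.
--     idx = {key: index for index, key in enumerate(keyboard)}
--     path = [0] + [idx[c] for c in word]
--     cross = [0] * (len(keyboard) + 1)
--     for a, b in zip(path, path[1:]):
--         lo, hi = (a, b) if a <= b else (b, a)
--         cross[lo] += 1
--         cross[hi] -= 1
--     total = 0
--     run = 0
--     for g in range(len(keyboard)):
--         run += cross[g]
--         total += run
--     return total
-- ===== Notes on version B (the rewrite author's own statement) =====
-- stated objective: alternative
-- what changed: B computes the travel distance by gap-crossing counting: each move of the finger path (started at slot 0) marks its slot interval in a difference array over the gaps between adjacent keyboard slots, and one prefix-sum sweep over the keyboard adds up how many moves cross each gap, instead of A's running loop summing absolute index differences of consecutive letters.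
import Mathlib
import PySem

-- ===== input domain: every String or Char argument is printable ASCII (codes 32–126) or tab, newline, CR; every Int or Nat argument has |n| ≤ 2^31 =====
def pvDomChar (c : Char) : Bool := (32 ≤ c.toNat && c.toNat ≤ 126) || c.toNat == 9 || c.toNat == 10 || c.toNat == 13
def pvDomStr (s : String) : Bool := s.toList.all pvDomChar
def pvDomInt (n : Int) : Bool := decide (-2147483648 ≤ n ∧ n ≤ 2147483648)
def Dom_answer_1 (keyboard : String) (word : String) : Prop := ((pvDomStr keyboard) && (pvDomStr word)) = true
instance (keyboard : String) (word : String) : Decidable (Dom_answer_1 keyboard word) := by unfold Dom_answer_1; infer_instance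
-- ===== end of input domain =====

-- B uses a different algorithm: instead of summing |pos-pos'| over consecutive letters, it
-- marks each move in a difference array over the gaps between adjacent keyboard slots and
-- sums the gap-crossing counts in one prefix-sum sweep over the keyboard.

-- ===== PORT A =====
-- {key: index for index, key in enumerate(keyboard)}
def pvMapper (keyboard : String) : PySem.Dict Char Int :=
  (PySem.List.enumerate keyboard.toList 0).foldl
    (fun d p => d.insert p.2 p.1) PySem.Dict.empty

def answer_1 (keyboard : String) (word : String) : Int :=
  let mapper := pvMapper keyboard
  let wl := word.toList
  let current_char := wl.getD 0 ' '          -- word[0]; empty word (IndexError) excluded by Pre_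
  let result := mapper.getD current_char 0   -- KeyError excluded by Pre_
  -- for index in range(1, len(word)): result += abs(mapper[current] - mapper[char]); current = char
  ((PySem.List.pyRange 1 (wl.length : Int) 1).foldl
    (fun (st : Int × Char) i =>
      let ch := PySem.List.pyGetD wl i ' '
      (st.1 + |mapper.getD st.2 0 - mapper.getD ch 0|, ch))
    (result, current_char)).1

-- ===== PORT B =====
def answer_1_alt (keyboard : String) (word : String) : Int :=
  let idx := pvMapper keyboard
  let path := (0 : Int) :: word.toList.map (fun c => idx.getD c 0)   -- KeyError excluded by Pre_
  -- cross = [0]*(len(keyboard)+1); for a, b in zip(path, path[1:]): cross[lo] += 1; cross[hi] -= 1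
  let cross := (path.zip path.tail).foldl
    (fun cr p =>
      let lo := min p.1 p.2                  -- lo, hi = (a, b) if a <= b else (b, a)
      let hi := max p.1 p.2
      let cr1 := PySem.List.pySetD cr lo (PySem.List.pyGetD cr lo 0 + 1)
      PySem.List.pySetD cr1 hi (PySem.List.pyGetD cr1 hi 0 - 1))
    (List.replicate (keyboard.toList.length + 1) (0 : Int))
  -- total = 0; run = 0; for g in range(len(keyboard)): run += cross[g]; total += run
  ((PySem.List.pyRange 0 (PySem.Str.len keyboard) 1).foldl
    (fun (st : Int × Int) g =>
      (st.1 + (st.2 + PySem.List.pyGetD cross g 0), st.2 + PySem.List.pyGetD cross g 0))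
    (0, 0)).1

-- ===== PRECONDITION & SPEC =====
-- Pre_ excludes exactly the inputs where A raises: empty word (IndexError on word[0])
-- and words containing a character missing from keyboard (KeyError).
-- (On an empty word B's path is just the start slot and it returns 0.)
def Pre_answer_1 (keyboard : String) (word : String) : Prop :=
  word.toList ≠ [] ∧ word.toList.all (fun c => keyboard.toList.contains c) = true
instance (keyboard : String) (word : String) : Decidable (Pre_answer_1 keyboard word) := by
  unfold Pre_answer_1; infer_instance

def pvWitness_answer_1 : String × String := ("ab", "ba")

def Spec_answer_1 (keyboard : String) (word : String) (out : Int) : Prop := out = answer_1_alt keyboard word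
instance (keyboard : String) (word : String) (out : Int) : Decidable (Spec_answer_1 keyboard word out) := by unfold Spec_answer_1; infer_instance

-- ===== CLAIM (what is proved, stated in full; the proofs are below) =====
def Claim_equal_answer_1 : Prop := ∀ (keyboard : String) (word : String), Dom_answer_1 keyboard word → Pre_answer_1 keyboard word → Spec_answer_1 keyboard word (answer_1 keyboard word)

-- ===== LEMMAS AND PROOFS =====

-- values looked up in a dict built by inserting pairs satisfy any property that
-- holds of the initial lookups and of all inserted values
theorem pv_getD_foldl_insert_pred (P : Int → Prop) :
    ∀ (l : List (Int × Char)) (d : PySem.Dict Char Int) (c : Char),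
      P (d.getD c 0) → (∀ p ∈ l, P p.1) →
      P ((l.foldl (fun d p => d.insert p.2 p.1) d).getD c 0) := by
  intro l
  induction l with
  | nil => intro d c hd _; simpa using hd
  | cons p l ih =>
    intro d c hd hl
    simp only [List.foldl_cons]
    refine ih _ c ?_ (fun q hq => hl q (List.mem_cons_of_mem _ hq))
    rw [PySem.Dict.getD_insert]
    split_ifs with h
    · exact hl p (List.mem_cons_self)
    · exact hd

-- every lookup in A's keyboard mapper (with default 0) lands in [0, len keyboard]
theorem pv_mapper_bounds (keyboard : String) (c : Char) :
    0 ≤ (pvMapper keyboard).getD c 0 ∧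
      (pvMapper keyboard).getD c 0 ≤ (keyboard.toList.length : Int) := by
  unfold pvMapper
  refine pv_getD_foldl_insert_pred
    (fun v => 0 ≤ v ∧ v ≤ (keyboard.toList.length : Int)) _ _ c (by simp) ?_
  intro p hp
  have h1 : p.1 ∈ (PySem.List.enumerate keyboard.toList 0).map (·.1) :=
    List.mem_map_of_mem hp
  rw [PySem.List.map_fst_enumerate] at h1
  have := (PySem.List.mem_pyRange_one).1 h1
  constructor <;> omega

-- counting the gaps g ∈ [0, n) with min a b ≤ g < max a b gives |a - b| when both ends lie in [0, n]
theorem pv_gap_count (n a b : Int) (ha0 : 0 ≤ a) (han : a ≤ n) (hb0 : 0 ≤ b) (hbn : b ≤ n) :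
    ((PySem.List.pyRange 0 n 1).countP
        (fun g => decide (min a b ≤ g ∧ g < max a b)) : Int) = |a - b| := by
  have hmn : (0 : Int) ≤ min a b := le_min ha0 hb0
  have hmm : min a b ≤ max a b := min_le_max
  have hMn : max a b ≤ n := max_le han hbn
  rw [PySem.List.pyRange_one_append 0 (min a b) n hmn (le_trans hmm hMn),
    PySem.List.pyRange_one_append (min a b) (max a b) n hmm hMn,
    List.countP_append, List.countP_append]
  have h1 : (PySem.List.pyRange 0 (min a b) 1).countP
      (fun g => decide (min a b ≤ g ∧ g < max a b)) = 0 := by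
    rw [List.countP_eq_zero]
    intro g hg
    have := (PySem.List.mem_pyRange_one).1 hg
    simp only [decide_eq_true_eq, not_and]
    omega
  have h3 : (PySem.List.pyRange (max a b) n 1).countP
      (fun g => decide (min a b ≤ g ∧ g < max a b)) = 0 := by
    rw [List.countP_eq_zero]
    intro g hg
    have := (PySem.List.mem_pyRange_one).1 hg
    simp only [decide_eq_true_eq, not_and]
    omega
  have h2 : (PySem.List.pyRange (min a b) (max a b) 1).countP
      (fun g => decide (min a b ≤ g ∧ g < max a b)) =
        (PySem.List.pyRange (min a b) (max a b) 1).length := by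
    rw [List.countP_eq_length]
    intro g hg
    have := (PySem.List.mem_pyRange_one).1 hg
    simp only [decide_eq_true_eq]
    omega
  rw [h1, h3, h2, PySem.List.length_pyRange_one]
  have : max a b - min a b = |a - b| := by
    rw [abs_sub_comm]; exact max_sub_min_eq_abs a b
  omega

-- exchange a double list sum
theorem pv_sum_exchange (f : Int → Int × Int → Int) :
    ∀ (G : List Int) (P : List (Int × Int)),
      (G.map (fun g => (P.map (f g)).sum)).sum
        = (P.map (fun p => (G.map (fun g => f g p)).sum)).sum := by
  intro G
  induction G with
  | nil => intro P; simp
  | cons g G ih =>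
    intro P
    simp only [List.map_cons, List.sum_cons, ih]
    rw [← PySem.List.sum_map_add_int]

-- the per-gap crossing totals sum to the pairwise |·|-distances, provided every
-- path entry lies in [0, n]
theorem pv_gap_sum_eq_abs_sum (n : Int) (path : List Int)
    (hpath : ∀ x ∈ path, 0 ≤ x ∧ x ≤ n) :
    ((PySem.List.pyRange 0 n 1).map
        (fun g => ((path.zip path.tail).map
          (fun p => if min p.1 p.2 ≤ g ∧ g < max p.1 p.2 then (1 : Int) else 0)).sum)).sum
      = ((path.zip path.tail).map (fun p => |p.1 - p.2|)).sum := by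
  rw [pv_sum_exchange (fun g p => if min p.1 p.2 ≤ g ∧ g < max p.1 p.2 then (1 : Int) else 0)]
  refine congrArg List.sum (List.map_congr_left ?_)
  intro p hp
  obtain ⟨h1', h2'⟩ := List.of_mem_zip hp
  have hb1 := hpath p.1 h1'
  have hb2 := hpath p.2 (List.mem_of_mem_tail h2')
  have hite : ∀ g : Int, (if min p.1 p.2 ≤ g ∧ g < max p.1 p.2 then (1 : Int) else 0)
      = (if (fun g => decide (min p.1 p.2 ≤ g ∧ g < max p.1 p.2)) g then (1 : Int) else 0) := by
    intro g; simp
  rw [List.map_congr_left (fun g _ => hite g), PySem.List.sum_map_ite_one_zero]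
  exact pv_gap_count n p.1 p.2 hb1.1 hb1.2 hb2.1 hb2.2

-- prefix sum of the first g+1 cells of the difference array
def pvPrefix (xs : List Int) (g : Int) : Int :=
  ((PySem.List.pyRange 0 (g + 1) 1).map (fun j => PySem.List.pyGetD xs j 0)).sum

-- reading a cell after a single in-range write
theorem pv_getD_setD (cr : List Int) (i j v : Int) (hi0 : 0 ≤ i)
    (hj0 : 0 ≤ j) (hjl : j < (cr.length : Int)) :
    PySem.List.pyGetD (PySem.List.pySetD cr i v) j 0
      = if j = i then v else PySem.List.pyGetD cr j 0 := by
  rw [PySem.List.pySetD_of_nonneg cr v hi0,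
    PySem.List.pyGetD_eq_getElem _ _ hj0 (by simpa using hjl), List.getElem_set]
  by_cases h : j = i
  · have : i.toNat = j.toNat := by omega
    simp [h, this]
  · have : ¬ i.toNat = j.toNat := by omega
    rw [if_neg this, if_neg h, PySem.List.pyGetD_eq_getElem _ _ hj0 hjl]

-- a 0/1 sum over a Nodup list that is 1 at exactly one candidate
theorem pv_sum_ite_eq_mem {l : List Int} (hnd : l.Nodup) (i δ : Int) :
    (l.map (fun j => if j = i then δ else 0)).sum = if i ∈ l then δ else 0 := by
  induction l with
  | nil => simp
  | cons x l ih =>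
    simp only [List.map_cons, List.sum_cons, ih (List.Nodup.of_cons hnd), List.mem_cons]
    by_cases hx : x = i
    · have : i ∉ l := by
        subst hx; exact (List.nodup_cons.1 hnd).1
      simp [hx, this]
    · by_cases hm : i ∈ l <;> simp [hx, hm, Ne.symm]

-- effect of one difference-array update on a prefix sum
theorem pv_prefix_setD (cr : List Int) (i g δ : Int) (hi0 : 0 ≤ i) (hil : i < (cr.length : Int))
    (hgl : g < (cr.length : Int)) :
    pvPrefix (PySem.List.pySetD cr i (PySem.List.pyGetD cr i 0 + δ)) g
      = pvPrefix cr g + (if i ≤ g then δ else 0) := by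
  unfold pvPrefix
  have hpt : ∀ j ∈ PySem.List.pyRange 0 (g + 1) 1,
      PySem.List.pyGetD (PySem.List.pySetD cr i (PySem.List.pyGetD cr i 0 + δ)) j 0
        = PySem.List.pyGetD cr j 0 + (if j = i then δ else 0) := by
    intro j hj
    have hjb := (PySem.List.mem_pyRange_one).1 hj
    rw [pv_getD_setD cr i j _ hi0 hjb.1 (by omega)]
    by_cases h : j = i
    · subst h; simp
    · simp [h]
  rw [List.map_congr_left hpt, PySem.List.sum_map_add_int,
    pv_sum_ite_eq_mem (PySem.List.nodup_pyRange_one 0 (g + 1)) i δ]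
  by_cases hig : i ≤ g
  · rw [if_pos hig, if_pos ((PySem.List.mem_pyRange_one).2 (by omega))]
  · rw [if_neg hig, if_neg (fun hm => hig (by have := (PySem.List.mem_pyRange_one).1 hm; omega))]

-- prefix sums of the difference array built by B's first loop count the moves
-- reaching at most gap g minus those already past it
theorem pv_prefix_cross (g : Int) :
    ∀ (P : List (Int × Int)) (cr : List Int),
      (∀ p ∈ P, 0 ≤ min p.1 p.2 ∧ max p.1 p.2 < (cr.length : Int)) →
      g < (cr.length : Int) →
      pvPrefix (P.foldl
          (fun cr p =>
            let lo := min p.1 p.2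
            let hi := max p.1 p.2
            let cr1 := PySem.List.pySetD cr lo (PySem.List.pyGetD cr lo 0 + 1)
            PySem.List.pySetD cr1 hi (PySem.List.pyGetD cr1 hi 0 - 1)) cr) g
        = pvPrefix cr g
          + (P.map (fun p => (if min p.1 p.2 ≤ g then (1 : Int) else 0)
              - (if max p.1 p.2 ≤ g then (1 : Int) else 0))).sum := by
  intro P
  induction P with
  | nil => intro cr _ _; simp
  | cons p P ih =>
    intro cr hP hg
    have hp := hP p (List.mem_cons_self)
    have hmm : min p.1 p.2 ≤ max p.1 p.2 := min_le_max
    simp only [List.foldl_cons]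
    set cr1 := PySem.List.pySetD cr (min p.1 p.2) (PySem.List.pyGetD cr (min p.1 p.2) 0 + 1)
      with hcr1
    have hlen1 : (cr1.length : Int) = (cr.length : Int) := by
      simp [hcr1, PySem.List.length_pySetD]
    set cr2 := PySem.List.pySetD cr1 (max p.1 p.2) (PySem.List.pyGetD cr1 (max p.1 p.2) 0 - 1)
      with hcr2
    have hlen2 : (cr2.length : Int) = (cr.length : Int) := by
      simp [hcr2, hcr1, PySem.List.length_pySetD]
    rw [ih cr2 (fun q hq => by rw [hlen2]; exact hP q (List.mem_cons_of_mem _ hq)) (by omega)]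
    have h2 : pvPrefix cr2 g = pvPrefix cr1 g + (if max p.1 p.2 ≤ g then (-1 : Int) else 0) := by
      rw [hcr2, show PySem.List.pyGetD cr1 (max p.1 p.2) 0 - 1
          = PySem.List.pyGetD cr1 (max p.1 p.2) 0 + (-1) by ring]
      exact pv_prefix_setD cr1 (max p.1 p.2) g (-1) (by omega) (by omega) (by omega)
    have h1 : pvPrefix cr1 g = pvPrefix cr g + (if min p.1 p.2 ≤ g then (1 : Int) else 0) :=
      pv_prefix_setD cr (min p.1 p.2) g 1 hp.1 (by omega) hg
    rw [h2, h1]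
    simp only [List.map_cons, List.sum_cons]
    split_ifs <;> ring

-- the prefix-sum recurrence used by B's sweep loop
theorem pv_prefix_succ (c : List Int) (m : Int) (hm : 0 ≤ m) :
    pvPrefix c m = pvPrefix c (m - 1) + PySem.List.pyGetD c m 0 := by
  unfold pvPrefix
  have : m - 1 + 1 = m := by ring
  rw [this, PySem.List.pyRange_one_succ_right hm, List.map_append, List.sum_append]
  simp

-- B's sweep loop accumulates the prefix sums over the scanned range
theorem pv_sweep_loop (c : List Int) (n' : Int) :
    ∀ (k : Nat) (m t r : Int), (n' - m).toNat = k → 0 ≤ m → r = pvPrefix c (m - 1) →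
      ((PySem.List.pyRange m n' 1).foldl
          (fun (st : Int × Int) g =>
            (st.1 + (st.2 + PySem.List.pyGetD c g 0), st.2 + PySem.List.pyGetD c g 0)) (t, r)).1
        = t + ((PySem.List.pyRange m n' 1).map (fun g => pvPrefix c g)).sum := by
  intro k
  induction k with
  | zero =>
    intro m t r hk _ _
    rw [PySem.List.pyRange_one_eq_nil (by omega)]
    simp
  | succ k ih =>
    intro m t r hk hm hr
    rw [PySem.List.pyRange_one_cons (show m < n' by omega)]
    simp only [List.foldl_cons, List.map_cons, List.sum_cons]
    have hrun : r + PySem.List.pyGetD c m 0 = pvPrefix c m := by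
      rw [pv_prefix_succ c m hm, hr]
    rw [hrun, ih (m + 1) (t + pvPrefix c m) (pvPrefix c m) (by omega) (by omega)
      (by rw [show m + 1 - 1 = m by ring])]
    ring

-- the initial difference array contributes nothing to any in-range prefix sum
theorem pv_prefix_replicate (L : Nat) (g : Int) (hg : g < (L : Int)) :
    pvPrefix (List.replicate L (0 : Int)) g = 0 := by
  unfold pvPrefix
  refine List.sum_eq_zero ?_
  intro x hx
  obtain ⟨j, hj, rfl⟩ := List.mem_map.1 hx
  have hjb := (PySem.List.mem_pyRange_one).1 hj
  rw [PySem.List.pyGetD_eq_getElem _ _ hjb.1 (by simp; omega)]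
  exact List.getElem_replicate _

-- A's running loop over the tail equals the pairwise |·|-sum over the mapped list
theorem pv_loop_eq_pairwise (f : Char → Int) (rest : List Char) (c0 : Char) (a : Int) :
    (rest.foldl (fun (st : Int × Char) ch => (st.1 + |f st.2 - f ch|, ch)) (a, c0)).1
      = a + ((((c0 :: rest).map f).zip (((c0 :: rest).map f).tail)).map
              (fun p => |p.1 - p.2|)).sum := by
  induction rest generalizing c0 a with
  | nil => simp
  | cons ch rest ih =>
    simp only [List.foldl_cons, List.map_cons, List.tail_cons, List.zip_cons_cons]
    rw [ih ch (a + |f c0 - f ch|)]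
    simp only [List.map_cons, List.tail_cons, List.sum_cons]
    ring

-- ===== VERDICT (by name: the statement is the Claim_ definition above) =====
theorem answer_1_spec : Claim_equal_answer_1 := by
  intro keyboard word _ hpre
  unfold Spec_answer_1 answer_1 answer_1_alt
  obtain ⟨hne, -⟩ := hpre
  obtain ⟨c0, rest, hwl⟩ : ∃ c r, word.toList = c :: r := by
    cases h : word.toList with
    | nil => exact absurd h hne
    | cons c r => exact ⟨c, r, rfl⟩
  simp only [hwl]
  -- A side: reduce the index loop to a structural loop over the tail, then to a pairwise sum
  rw [PySem.List.foldl_pyRange_pyGetD' (c0 :: rest) ' '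
      (fun (st : Int × Char) ch => (st.1 + |(pvMapper keyboard).getD st.2 0 - (pvMapper keyboard).getD ch 0|, ch))
      _ (by norm_num : (0:Int) ≤ 1)]
  have hdrop : List.drop (Int.toNat 1) (c0 :: rest) = rest := rfl
  simp only [List.getD_cons_zero]
  rw [hdrop, pv_loop_eq_pairwise (fun c => (pvMapper keyboard).getD c 0) rest c0]
  -- B side: name the path and its bounds
  set path := (0 : Int) :: (c0 :: rest).map (fun c => (pvMapper keyboard).getD c 0) with hpathdef
  have hb : ∀ x ∈ path, 0 ≤ x ∧ x ≤ (keyboard.toList.length : Int) := by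
    intro x hx
    rcases List.mem_cons.1 hx with h0 | hx'
    · subst h0; exact ⟨le_refl 0, Int.natCast_nonneg _⟩
    · obtain ⟨c, -, rfl⟩ := List.mem_map.1 hx'
      exact pv_mapper_bounds keyboard c
  have hpair : ∀ p ∈ path.zip path.tail,
      0 ≤ min p.1 p.2 ∧
        max p.1 p.2 < ((List.replicate (keyboard.toList.length + 1) (0 : Int)).length : Int) := by
    intro p hp
    obtain ⟨h1', h2'⟩ := List.of_mem_zip hp
    have hb1 := hb p.1 h1'
    have hb2 := hb p.2 (List.mem_of_mem_tail h2')
    have : min p.1 p.2 ≤ max p.1 p.2 := min_le_max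
    constructor
    · exact le_min hb1.1 hb2.1
    · simp only [List.length_replicate]
      have : max p.1 p.2 ≤ (keyboard.toList.length : Int) := max_le hb1.2 hb2.2
      push_cast
      omega
  have hlen : PySem.Str.len keyboard = (keyboard.toList.length : Int) := PySem.Str.len_eq keyboard
  -- sweep loop → prefix sums → per-gap crossing counts → pairwise |·|-sum
  rw [hlen, pv_sweep_loop _ (keyboard.toList.length : Int)
      ((keyboard.toList.length : Int) - 0).toNat 0 0 0 rfl (le_refl 0)
      (by rw [show (0 : Int) - 1 = -1 by ring]; unfold pvPrefix
          rw [show (-1 : Int) + 1 = 0 by ring, PySem.List.pyRange_one_eq_nil (le_refl 0)]; simp),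
    zero_add]
  have hgap : ∀ g ∈ PySem.List.pyRange 0 (keyboard.toList.length : Int) 1,
      pvPrefix ((path.zip path.tail).foldl
          (fun cr p =>
            let lo := min p.1 p.2
            let hi := max p.1 p.2
            let cr1 := PySem.List.pySetD cr lo (PySem.List.pyGetD cr lo 0 + 1)
            PySem.List.pySetD cr1 hi (PySem.List.pyGetD cr1 hi 0 - 1))
          (List.replicate (keyboard.toList.length + 1) (0 : Int))) g
        = ((path.zip path.tail).map
            (fun p => if min p.1 p.2 ≤ g ∧ g < max p.1 p.2 then (1 : Int) else 0)).sum := by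
    intro g hg
    have hgb := (PySem.List.mem_pyRange_one).1 hg
    have hgl : g < ((List.replicate (keyboard.toList.length + 1) (0 : Int)).length : Int) := by
      simp only [List.length_replicate]; push_cast; omega
    rw [pv_prefix_cross g (path.zip path.tail) _ hpair hgl,
      pv_prefix_replicate _ g (by simpa using hgl), zero_add]
    refine congrArg List.sum (List.map_congr_left ?_)
    intro p hp
    have : min p.1 p.2 ≤ max p.1 p.2 := min_le_max
    split_ifs <;> omega
  rw [List.map_congr_left hgap,
    pv_gap_sum_eq_abs_sum (keyboard.toList.length : Int) path hb]
  -- both are now f c0 + Σ pairwise over the mapped tail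
  rw [hpathdef]
  simp only [List.map_cons, List.tail_cons, List.zip_cons_cons, List.map_cons, List.sum_cons]
  have h0 : |0 - (pvMapper keyboard).getD c0 0| = (pvMapper keyboard).getD c0 0 := by
    have := (pv_mapper_bounds keyboard c0).1
    rw [zero_sub, abs_neg, abs_of_nonneg this]
  rw [h0]
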